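-- pv_equiv track=rewrite | github.com/ragnarok-calcs/rox_tools | ragnarok_x/WIP_pages/Card_Optimizer.py | _generate_assignments
-- ===== SOURCE A (Python) =====
-- def _generate_assignments(card_counts: dict, n_slots: int):
--     """Generate all ways to fill n_slots from available cards (respecting ownership counts)."""
--     card_names = list(card_counts.keys())
--
--     def _recurse(idx, remaining, current):
--         if remaining == 0:
--             yield tuple(current)
--             return
--         if idx >= len(card_names):
--             yield tuple(current) + ("None",) * remaining
--             return
--         name = card_names[idx]
--         for use in range(min(card_counts[name], remaining) + 1):
--             yield from _recurse(idx + 1, remaining - use, current + [name] * use)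
--
--     yield from _recurse(0, n_slots, [])
-- ===== SOURCE B (Python) =====
-- def _generate_assignments(card_counts: dict, n_slots: int):
--     """Generate all ways to fill n_slots from available cards (respecting ownership counts)."""
--     names = list(card_counts.keys())
--     k = len(names)
--     # forward pass: which remainders can be pending when we reach each suffix of the card list
--     reach = [{n_slots}]
--     for i in range(k):
--         c = card_counts[names[i]]
--         nxt = set()
--         for r in reach[i]:
--             if r != 0:
--                 for u in range(min(c, r) + 1):
--                     nxt.add(r - u)
--         reach.append(nxt)
--     # backward pass: table[i][r] = all assignments filling r slots using only names[i:]
--     table = [dict() for _ in range(k + 1)]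
--     for r in reach[k]:
--         table[k][r] = [()] if r == 0 else [("None",) * r]
--     for i in range(k - 1, -1, -1):
--         c = card_counts[names[i]]
--         for r in reach[i]:
--             if r == 0:
--                 table[i][r] = [()]
--             else:
--                 table[i][r] = [
--                     (names[i],) * u + t
--                     for u in range(min(c, r) + 1)
--                     for t in table[i + 1][r - u]
--                 ]
--     yield from table[0][n_slots]
-- ===== Notes on version B (the rewrite author's own statement) =====
-- stated objective: alternative
-- what changed: Replaces A's top-down recursive generator by a two-pass dynamic program: a forward pass computes the set of reachable pending remainders at each suffix of the card list, then a backward pass tabulates, for exactly those states, all assignments filling r slots from that suffix; the answer is table[0][n_slots], yielding the same tuples in the same order.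
import Mathlib
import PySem

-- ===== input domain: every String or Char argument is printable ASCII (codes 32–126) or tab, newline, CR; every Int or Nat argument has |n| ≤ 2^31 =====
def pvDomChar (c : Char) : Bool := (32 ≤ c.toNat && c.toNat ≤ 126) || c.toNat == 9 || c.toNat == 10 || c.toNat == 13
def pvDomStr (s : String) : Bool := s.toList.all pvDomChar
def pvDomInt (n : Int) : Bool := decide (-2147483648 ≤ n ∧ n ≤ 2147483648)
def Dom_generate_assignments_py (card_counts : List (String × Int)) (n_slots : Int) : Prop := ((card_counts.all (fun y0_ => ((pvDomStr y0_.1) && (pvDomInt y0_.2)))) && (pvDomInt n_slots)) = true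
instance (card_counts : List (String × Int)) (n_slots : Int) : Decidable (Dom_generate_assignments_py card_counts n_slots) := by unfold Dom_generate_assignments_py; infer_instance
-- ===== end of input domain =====

-- B replaces A's top-down recursive generator by a two-pass dynamic program (forward
-- reachable-remainder sets, then a backward table over exactly those states); both Pythons
-- are generators, the equivalence is about the list of yielded values.

-- ===== PORT A =====
-- _recurse(idx, remaining, current); Python's card_counts[name] is ported as getD 0, which is
-- exact here because name is always drawn from the dict's own keys (no KeyError possible).
def pvARecurse (d : PySem.Dict String Int) (card_names : List String)
    (idx remaining : Int) (current : List String) : List (List String) :=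
  if remaining = 0 then [current]
  else if (card_names.length : Int) ≤ idx then
    [current ++ List.replicate remaining.toNat "None"]
  else
    (PySem.List.pyRange 0
        (min (d.getD ((PySem.List.pyGet? card_names idx).getD "") 0) remaining + 1) 1).foldl
      (fun acc use =>
        acc ++ pvARecurse d card_names (idx + 1) (remaining - use)
          (current ++ List.replicate use.toNat ((PySem.List.pyGet? card_names idx).getD "")))
      []
  termination_by ((card_names.length : Int) - idx).toNat
  decreasing_by omega

def generate_assignments_py (card_counts : List (String × Int)) (n_slots : Int) : List (List String) :=
  pvARecurse (PySem.Dict.ofList card_counts) (PySem.Dict.ofList card_counts).keys 0 n_slots []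

-- ===== PORT B =====
-- forward pass: nxt = {r - u : r in cur, r != 0, 0 <= u <= min(card_counts[name], r)}
def pvNext (d : PySem.Dict String Int) (name : String) (cur : PySem.Set Int) : PySem.Set Int :=
  cur.foldl (fun nxt r =>
    if r = 0 then nxt
    else (PySem.List.pyRange 0 (min (d.getD name 0) r + 1) 1).foldl
      (fun nxt u => PySem.Set.add nxt (r - u)) nxt) PySem.Set.empty

-- the list [reach[0], …, reach[k]] built by the forward loop
def pvReachList (d : PySem.Dict String Int) : List String → PySem.Set Int → List (PySem.Set Int)
  | [], cur => [cur]
  | name :: rest, cur => cur :: pvReachList d rest (pvNext d name cur)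

-- backward pass: table[i] for the suffix names[i:], keyed by the reachable remainders
def pvTables (d : PySem.Dict String Int) :
    List String → List (PySem.Set Int) → PySem.Dict Int (List (List String))
  | [], reaches =>
      (reaches.headD PySem.Set.empty).foldl
        (fun t r => t.insert r (if r = 0 then [[]] else [List.replicate r.toNat "None"]))
        PySem.Dict.empty
  | name :: rest, reaches =>
      (reaches.headD PySem.Set.empty).foldl
        (fun t r => t.insert r (if r = 0 then [[]]
          else (PySem.List.pyRange 0 (min (d.getD name 0) r + 1) 1).flatMap
            (fun u => ((pvTables d rest reaches.tail).getD (r - u) []).map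
              (fun t' => List.replicate u.toNat name ++ t'))))
        PySem.Dict.empty

-- table[0][n_slots] and table[i+1][r-u] are direct key accesses; getD [] is exact because the
-- accessed key is always a member of the corresponding reach set (no KeyError possible).
def generate_assignments_py_alt (card_counts : List (String × Int)) (n_slots : Int) : List (List String) :=
  (pvTables (PySem.Dict.ofList card_counts) (PySem.Dict.ofList card_counts).keys
      (pvReachList (PySem.Dict.ofList card_counts) (PySem.Dict.ofList card_counts).keys
        (PySem.Set.ofList [n_slots]))).getD n_slots []

-- ===== PRECONDITION & SPEC =====
def Spec_generate_assignments_py (card_counts : List (String × Int)) (n_slots : Int) (out : List (List String)) : Prop := out = generate_assignments_py_alt card_counts n_slots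
instance (card_counts : List (String × Int)) (n_slots : Int) (out : List (List String)) : Decidable (Spec_generate_assignments_py card_counts n_slots out) := by unfold Spec_generate_assignments_py; infer_instance

-- ===== CLAIM (what is proved, stated in full; the proofs are below) =====
def Claim_equal_generate_assignments_py : Prop := ∀ (card_counts : List (String × Int)) (n_slots : Int), Dom_generate_assignments_py card_counts n_slots → Spec_generate_assignments_py card_counts n_slots (generate_assignments_py card_counts n_slots)

-- ===== LEMMAS AND PROOFS =====

-- the common suffix function: the assignments filling r slots from a given tail of card names
def pvF (d : PySem.Dict String Int) : List String → Int → List (List String)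
  | [], r => if r = 0 then [[]] else [List.replicate r.toNat "None"]
  | name :: rest, r =>
    if r = 0 then [[]]
    else
      (PySem.List.pyRange 0 (min (d.getD name 0) r + 1) 1).flatMap
        (fun u => (pvF d rest (r - u)).map (fun t => List.replicate u.toNat name ++ t))

theorem pvF_nil (d : PySem.Dict String Int) (r : Int) :
    pvF d [] r = if r = 0 then [[]] else [List.replicate r.toNat "None"] := rfl

theorem pvF_cons (d : PySem.Dict String Int) (name : String) (rest : List String) (r : Int) :
    pvF d (name :: rest) r =
      if r = 0 then [[]]
      else
        (PySem.List.pyRange 0 (min (d.getD name 0) r + 1) 1).flatMap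
          (fun u => (pvF d rest (r - u)).map (fun t => List.replicate u.toNat name ++ t)) := rfl

theorem pvF_zero (d : PySem.Dict String Int) (names : List String) : pvF d names 0 = [[]] := by
  cases names <;> rfl

theorem pvARecurse_eq_f (d : PySem.Dict String Int) (names : List String) :
    ∀ (k : Nat) (idx r : Int) (cur : List String), 0 ≤ idx →
      ((names.length : Int) - idx).toNat = k →
      pvARecurse d names idx r cur = (pvF d (names.drop idx.toNat) r).map (fun t => cur ++ t) := by
  intro k
  induction k using Nat.strong_induction_on with
  | _ k IH =>
    intro idx r cur h0 hk
    rw [pvARecurse.eq_def]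
    by_cases hr : r = 0
    · subst hr
      rw [if_pos rfl, pvF_zero]
      simp
    · rw [if_neg hr]
      by_cases hlen : (names.length : Int) ≤ idx
      · rw [if_pos hlen]
        have hdrop : names.drop idx.toNat = [] := List.drop_eq_nil_of_le (by omega)
        rw [hdrop, pvF_nil, if_neg hr]
        simp
      · rw [if_neg hlen]
        have hn : idx.toNat < names.length := by omega
        have hdrop : names.drop idx.toNat = names[idx.toNat] :: names.drop (idx.toNat + 1) :=
          List.drop_eq_getElem_cons hn
        have hname : (PySem.List.pyGet? names idx).getD "" = names[idx.toNat] := by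
          rw [PySem.List.pyGet?_of_nonneg names h0, List.getElem?_eq_getElem hn]
          rfl
        rw [hdrop, pvF_cons, if_neg hr, hname]
        rw [PySem.List.foldl_append_eq_flatMap, List.nil_append, List.map_flatMap]
        apply List.flatMap_congr
        intro u _
        have h1 : (idx + 1).toNat = idx.toNat + 1 := by omega
        rw [IH (((names.length : Int) - (idx + 1)).toNat) (by omega) (idx + 1) (r - u) _
            (by omega) rfl, h1, List.map_map]
        simp [Function.comp_def, List.append_assoc]

-- membership and Nodup facts about the forward pass
theorem pv_nodup_foldl_add (l : List Int) (f : Int → Int) (s : PySem.Set Int) (hs : s.Nodup) :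
    (l.foldl (fun s u => PySem.Set.add s (f u)) s).Nodup := by
  induction l generalizing s with
  | nil => exact hs
  | cons x xs ih => exact ih _ (PySem.Set.nodup_add _ _ hs)

theorem pv_nodup_next (d : PySem.Dict String Int) (name : String) (cur : PySem.Set Int) :
    (pvNext d name cur).Nodup := by
  unfold pvNext
  generalize hs : (PySem.Set.empty : PySem.Set Int) = s
  have hsn : s.Nodup := by rw [← hs]; exact List.nodup_nil
  clear hs
  induction cur generalizing s with
  | nil => exact hsn
  | cons r rest ih =>
    rw [List.foldl_cons]
    apply ih
    by_cases h : r = 0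
    · rw [if_pos h]; exact hsn
    · rw [if_neg h]; exact pv_nodup_foldl_add _ _ _ hsn

theorem pv_next_mono (d : PySem.Dict String Int) (name : String) (cur : List Int)
    (s : PySem.Set Int) (x : Int) (hx : x ∈ s) :
    x ∈ cur.foldl (fun nxt r =>
      if r = 0 then nxt
      else (PySem.List.pyRange 0 (min (d.getD name 0) r + 1) 1).foldl
        (fun nxt u => PySem.Set.add nxt (r - u)) nxt) s := by
  induction cur generalizing s with
  | nil => exact hx
  | cons r rest ih =>
    rw [List.foldl_cons]
    apply ih
    by_cases h : r = 0
    · rw [if_pos h]; exact hx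
    · rw [if_neg h, PySem.Set.mem_foldl_add]; exact Or.inl hx

theorem pv_mem_next (d : PySem.Dict String Int) (name : String) (cur : PySem.Set Int)
    (r u : Int) (hr : r ∈ cur) (hr0 : r ≠ 0)
    (hu : u ∈ PySem.List.pyRange 0 (min (d.getD name 0) r + 1) 1) :
    r - u ∈ pvNext d name cur := by
  unfold pvNext
  generalize (PySem.Set.empty : PySem.Set Int) = s
  induction cur generalizing s with
  | nil => exact absurd hr (List.not_mem_nil)
  | cons x rest ih =>
    rw [List.foldl_cons]
    rcases List.mem_cons.mp hr with h | h
    · subst h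
      apply pv_next_mono
      rw [if_neg hr0, PySem.Set.mem_foldl_add]
      exact Or.inr ⟨u, hu, rfl⟩
    · exact ih h _

-- getD after a fold of fresh inserts
theorem pv_getD_foldl_insert_not_mem (l : List Int) (g : Int → List (List String)) :
    ∀ (t : PySem.Dict Int (List (List String))) (r : Int), r ∉ l →
      (l.foldl (fun t x => t.insert x (g x)) t).getD r [] = t.getD r [] := by
  induction l with
  | nil => intro t r _; rfl
  | cons x xs ih =>
    intro t r hr
    have hne : r ≠ x := fun h => hr (by rw [h]; exact List.mem_cons_self)
    rw [List.foldl_cons, ih _ r (fun h => hr (List.mem_cons_of_mem _ h)),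
      PySem.Dict.getD_insert, if_neg hne]

theorem pv_getD_foldl_insert_mem (l : List Int) (g : Int → List (List String)) :
    ∀ (t : PySem.Dict Int (List (List String))) (r : Int), r ∈ l → l.Nodup →
      (l.foldl (fun t x => t.insert x (g x)) t).getD r [] = g r := by
  induction l with
  | nil => intro t r hr _; exact absurd hr (List.not_mem_nil)
  | cons x xs ih =>
    intro t r hr hnd
    rw [List.foldl_cons]
    rcases List.mem_cons.mp hr with h | h
    · subst h
      rw [pv_getD_foldl_insert_not_mem xs g _ r (List.nodup_cons.mp hnd).1,
        PySem.Dict.getD_insert, if_pos rfl]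
    · exact ih _ r h (List.Nodup.of_cons hnd)

theorem pvReachList_nil (d : PySem.Dict String Int) (cur : PySem.Set Int) :
    pvReachList d [] cur = [cur] := rfl

theorem pvReachList_cons (d : PySem.Dict String Int) (name : String) (rest : List String)
    (cur : PySem.Set Int) :
    pvReachList d (name :: rest) cur = cur :: pvReachList d rest (pvNext d name cur) := rfl

theorem pvTables_nil (d : PySem.Dict String Int) (reaches : List (PySem.Set Int)) :
    pvTables d [] reaches =
      (reaches.headD PySem.Set.empty).foldl
        (fun t r => t.insert r (if r = 0 then [[]] else [List.replicate r.toNat "None"]))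
        PySem.Dict.empty := rfl

theorem pvTables_cons (d : PySem.Dict String Int) (name : String) (rest : List String)
    (reaches : List (PySem.Set Int)) :
    pvTables d (name :: rest) reaches =
      (reaches.headD PySem.Set.empty).foldl
        (fun t r => t.insert r (if r = 0 then [[]]
          else (PySem.List.pyRange 0 (min (d.getD name 0) r + 1) 1).flatMap
            (fun u => ((pvTables d rest reaches.tail).getD (r - u) []).map
              (fun t' => List.replicate u.toNat name ++ t'))))
        PySem.Dict.empty := rfl

-- the backward table computes pvF on every reachable remainder
theorem pvTables_getD (d : PySem.Dict String Int) (names : List String) :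
    ∀ (cur : PySem.Set Int), cur.Nodup → ∀ r ∈ cur,
      (pvTables d names (pvReachList d names cur)).getD r [] = pvF d names r := by
  induction names with
  | nil =>
    intro cur hnd r hr
    rw [pvReachList_nil, pvTables_nil, List.headD_cons,
      pv_getD_foldl_insert_mem cur _ _ r hr hnd, pvF_nil]
  | cons name rest ih =>
    intro cur hnd r hr
    rw [pvReachList_cons, pvTables_cons, List.headD_cons, List.tail_cons,
      pv_getD_foldl_insert_mem cur _ _ r hr hnd, pvF_cons]
    by_cases h0 : r = 0
    · rw [if_pos h0, if_pos h0]
    · rw [if_neg h0, if_neg h0]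
      apply List.flatMap_congr
      intro u hu
      rw [ih (pvNext d name cur) (pv_nodup_next d name cur) (r - u)
        (pv_mem_next d name cur r u hr h0 hu)]

-- ===== VERDICT (by name: the statement is the Claim_ definition above) =====
theorem generate_assignments_py_spec : Claim_equal_generate_assignments_py := by
  unfold Claim_equal_generate_assignments_py
  intro cc n _
  unfold Spec_generate_assignments_py
  unfold generate_assignments_py generate_assignments_py_alt
  rw [pvARecurse_eq_f (PySem.Dict.ofList cc) (PySem.Dict.ofList cc).keys
    (((PySem.Dict.ofList cc).keys.length : Int) - 0).toNat 0 n [] le_rfl rfl]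
  rw [pvTables_getD (PySem.Dict.ofList cc) (PySem.Dict.ofList cc).keys
    (PySem.Set.ofList [n]) (PySem.Set.nodup_ofList _) n
    ((PySem.Set.mem_ofList _ _).mpr (List.mem_singleton.mpr rfl))]
  simp
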